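-- pv_equiv track=rewrite | github.com/rdj/advent_py | 2024-16/aoc.py | r_build_covered
-- ===== SOURCE A (Python) =====
-- def r_build_covered(covered, best_known, src):
--     covered.add(src)
--
--     for state, (cost, prev) in best_known.items():
--         if state == src:
--             for state in prev:
--                 if state not in covered:
--                     r_build_covered(covered, best_known, state)
--     return covered
-- ===== SOURCE B (Python) =====
-- def r_build_covered(covered, best_known, src):
--     # iterative DFS with an explicit stack instead of recursion
--     covered.add(src)
--     entry = best_known.get(src)
--     stack = list(reversed(entry[1])) if entry is not None else []
--     while stack:
--         node = stack.pop()
--         if node not in covered: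
--             covered.add(node)
--             entry = best_known.get(node)
--             if entry is not None:
--                 stack.extend(reversed(entry[1]))
--     return covered
-- ===== Notes on version B (the rewrite author's own statement) =====
-- stated objective: alternative
-- what changed: A's recursive DFS over prev-links (scanning all of best_known.items() for the matching key at every call) is replaced by an iterative worklist loop with an explicit stack and a direct best_known.get(node) lookup.
import Mathlib
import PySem

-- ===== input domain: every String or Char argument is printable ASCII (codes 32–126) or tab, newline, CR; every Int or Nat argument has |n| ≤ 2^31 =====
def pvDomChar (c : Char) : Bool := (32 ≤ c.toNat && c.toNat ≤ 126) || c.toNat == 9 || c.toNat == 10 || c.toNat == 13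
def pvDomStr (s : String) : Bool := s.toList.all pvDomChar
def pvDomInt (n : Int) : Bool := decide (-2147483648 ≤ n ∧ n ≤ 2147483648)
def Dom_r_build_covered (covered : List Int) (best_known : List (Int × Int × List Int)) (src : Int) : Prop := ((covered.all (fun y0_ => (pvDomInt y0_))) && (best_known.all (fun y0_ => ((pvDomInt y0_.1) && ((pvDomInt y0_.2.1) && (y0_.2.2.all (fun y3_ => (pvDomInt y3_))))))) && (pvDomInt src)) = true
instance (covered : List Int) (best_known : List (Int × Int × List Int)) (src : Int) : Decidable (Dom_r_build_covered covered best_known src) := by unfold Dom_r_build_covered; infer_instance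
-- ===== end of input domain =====

-- B replaces A's recursive DFS over prev-links by an explicit stack-based worklist loop with a
-- direct dict lookup (objective: alternative decomposition, same asymptotic cost).
-- Python A mutates the `covered` set in place and returns it; B performs the same mutation.

-- ===== PORT A =====
-- `fuel` is only a totality guard for Lean (the Python recursion has none): it is computed once
-- at the top call and proved sufficient by the lemmas below (it never runs out on any input).
def r_build_covered_rec (fuel : Nat) (bk : PySem.Dict Int (Int × List Int)) (covered : List Int) (src : Int) : List Int :=
  match fuel with
  | 0 => covered
  | f + 1 =>
    bk.items.foldl
      (fun cov it =>
        if it.1 == src then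
          it.2.2.foldl
            (fun cov state =>
              if PySem.Set.contains cov state then cov
              else r_build_covered_rec f bk cov state)
            cov
        else cov)
      (PySem.Set.add covered src)

def r_build_covered (covered : List Int) (best_known : List (Int × Int × List Int)) (src : Int) : List Int :=
  let d := PySem.Dict.ofList best_known
  r_build_covered_rec (((d.items.map (fun p => p.2.2)).flatten).length + 2) d covered src

-- ===== PORT B =====
-- best_known.get(node): the prev-list of `node`, empty when the key is absent
def pvChildren (bk : PySem.Dict Int (Int × List Int)) (node : Int) : List Int :=
  match bk.get? node with
  | some entry => entry.2
  | none => []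

-- all prev-states stored in the dict (used only by the loop's termination measure)
def pvPrevs (bk : PySem.Dict Int (Int × List Int)) : List Int :=
  (bk.items.map (fun p => p.2.2)).flatten

-- the next three lemmas are cited by the termination proof of r_build_covered_loop
theorem pvChildren_subset (bk : PySem.Dict Int (Int × List Int)) (node : Int) :
    ∀ x ∈ pvChildren bk node, x ∈ pvPrevs bk := by
  intro x hx
  unfold pvChildren at hx
  cases hg : bk.get? node with
  | none => rw [hg] at hx; simp at hx
  | some entry =>
    rw [hg] at hx
    have hmem := PySem.Dict.mem_items_of_get?_eq_some _ hg
    exact List.mem_flatten.2 ⟨entry.2, List.mem_map.2 ⟨(node, entry), hmem, rfl⟩, hx⟩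

theorem pv_toFinset_add (cov : List Int) (x : Int) (h : x ∉ cov) :
    (PySem.Set.add cov x).toFinset = insert x cov.toFinset := by
  simp [PySem.Set.add, PySem.Set.contains, h]

theorem pv_card_step (bk : PySem.Dict Int (Int × List Int)) (node : Int)
    (rest cov : List Int) (hnode : node ∉ cov) :
    ((pvPrevs bk ++ (pvChildren bk node ++ rest)).toFinset \ (PySem.Set.add cov node).toFinset).card
      < ((pvPrevs bk ++ node :: rest).toFinset \ cov.toFinset).card := by
  apply Finset.card_lt_card
  have hsub : (pvPrevs bk ++ (pvChildren bk node ++ rest)).toFinset \ (PySem.Set.add cov node).toFinset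
      ⊆ (pvPrevs bk ++ node :: rest).toFinset \ cov.toFinset := by
    intro x hx
    simp only [pv_toFinset_add cov node hnode, List.toFinset_append, List.toFinset_cons,
      Finset.mem_sdiff, Finset.mem_union, Finset.mem_insert, List.mem_toFinset] at hx ⊢
    rcases hx with ⟨hin, hout⟩
    refine ⟨?_, fun hc => hout (Or.inr hc)⟩
    rcases hin with h | h
    · exact Or.inl h
    rcases h with h | h
    · exact Or.inl (pvChildren_subset bk node x h)
    · exact Or.inr (Or.inr h)
  rw [Finset.ssubset_iff_of_subset hsub]
  refine ⟨node, by simp [hnode], by simp [pv_toFinset_add cov node hnode]⟩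

-- B's while-loop; the head of `stack` is the top (Python pushes the reversed children at the
-- list end and pops from the end, which is this same order)
def r_build_covered_loop (bk : PySem.Dict Int (Int × List Int)) (stack : List Int) (cov : List Int) : List Int :=
  match stack with
  | [] => cov
  | node :: rest =>
    if PySem.Set.contains cov node then r_build_covered_loop bk rest cov
    else r_build_covered_loop bk (pvChildren bk node ++ rest) (PySem.Set.add cov node)
termination_by (((pvPrevs bk ++ stack).toFinset \ cov.toFinset).card, stack.length)
decreasing_by
  · have hsub : (pvPrevs bk ++ rest).toFinset \ cov.toFinset ⊆ (pvPrevs bk ++ node :: rest).toFinset \ cov.toFinset := by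
      intro x hx
      simp only [List.toFinset_append, List.toFinset_cons, Finset.mem_sdiff, Finset.mem_union, Finset.mem_insert] at hx ⊢
      tauto
    have hle := Finset.card_le_card hsub
    rcases lt_or_eq_of_le hle with h | h
    · exact Prod.Lex.left _ _ h
    · rw [h]; exact Prod.Lex.right _ (by simp)
  · rename_i hcov
    have hnode : node ∉ cov := by simpa [PySem.Set.contains] using hcov
    exact Prod.Lex.left _ _ (pv_card_step bk node rest cov hnode)

def r_build_covered_alt (covered : List Int) (best_known : List (Int × Int × List Int)) (src : Int) : List Int :=
  let d := PySem.Dict.ofList best_known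
  r_build_covered_loop d (pvChildren d src) (PySem.Set.add covered src)

-- ===== PRECONDITION & SPEC =====
def Spec_r_build_covered (covered : List Int) (best_known : List (Int × Int × List Int)) (src : Int) (out : List Int) : Prop := out = r_build_covered_alt covered best_known src
instance (covered : List Int) (best_known : List (Int × Int × List Int)) (src : Int) (out : List Int) : Decidable (Spec_r_build_covered covered best_known src out) := by unfold Spec_r_build_covered; infer_instance

-- ===== CLAIM (what is proved, stated in full; the proofs are below) =====
def Claim_equal_r_build_covered : Prop := ∀ (covered : List Int) (best_known : List (Int × Int × List Int)) (src : Int), Dom_r_build_covered covered best_known src → Spec_r_build_covered covered best_known src (r_build_covered covered best_known src)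

-- ===== LEMMAS AND PROOFS =====

theorem pv_loop_nil (bk : PySem.Dict Int (Int × List Int)) (cov : List Int) :
    r_build_covered_loop bk [] cov = cov := by
  rw [r_build_covered_loop]

theorem pv_loop_cons_covered (bk : PySem.Dict Int (Int × List Int)) (node : Int)
    (rest cov : List Int) (h : PySem.Set.contains cov node = true) :
    r_build_covered_loop bk (node :: rest) cov = r_build_covered_loop bk rest cov := by
  rw [r_build_covered_loop, if_pos h]

theorem pv_loop_cons_uncovered (bk : PySem.Dict Int (Int × List Int)) (node : Int)
    (rest cov : List Int) (h : ¬ PySem.Set.contains cov node = true) :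
    r_build_covered_loop bk (node :: rest) cov
      = r_build_covered_loop bk (pvChildren bk node ++ rest) (PySem.Set.add cov node) := by
  rw [r_build_covered_loop, if_neg h]

theorem pv_loop_mono (bk : PySem.Dict Int (Int × List Int)) (stack cov : List Int) :
    ∃ e, r_build_covered_loop bk stack cov = cov ++ e := by
  induction stack, cov using r_build_covered_loop.induct bk with
  | case1 cov => exact ⟨[], by simp [r_build_covered_loop]⟩
  | case2 cov node rest hcov ih =>
    obtain ⟨e, he⟩ := ih
    exact ⟨e, by rw [r_build_covered_loop, if_pos hcov]; exact he⟩
  | case3 cov node rest hcov ih =>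
    obtain ⟨e, he⟩ := ih
    refine ⟨(if PySem.Set.contains cov node then [] else [node]) ++ e, ?_⟩
    rw [r_build_covered_loop, if_neg hcov, he]
    simp only [PySem.Set.add, PySem.Set.contains]
    split_ifs <;> simp

theorem pv_card_add (bk : PySem.Dict Int (Int × List Int)) (p : Int) (cov : List Int)
    (hp : p ∈ pvPrevs bk) (hcov : p ∉ cov) :
    (((pvPrevs bk).toFinset \ (PySem.Set.add cov p).toFinset).card) + 1
      = ((pvPrevs bk).toFinset \ cov.toFinset).card := by
  rw [pv_toFinset_add cov p hcov, Finset.sdiff_insert,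
    Finset.card_erase_of_mem (by simp [hp, hcov])]
  have : 0 < ((pvPrevs bk).toFinset \ cov.toFinset).card :=
    Finset.card_pos.2 ⟨p, by simp [hp, hcov]⟩
  omega

theorem pv_loop_append (bk : PySem.Dict Int (Int × List Int)) (n : Nat) :
    ∀ (a b cov : List Int),
      (((pvPrevs bk ++ a).toFinset \ cov.toFinset).card ≤ n) →
      r_build_covered_loop bk (a ++ b) cov
        = r_build_covered_loop bk b (r_build_covered_loop bk a cov) := by
  induction n using Nat.strong_induction_on with
  | _ n ihn =>
    intro a
    induction a with
    | nil => intro b cov _; rw [List.nil_append, pv_loop_nil]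
    | cons x a' iha =>
      intro b cov h
      by_cases hx : PySem.Set.contains cov x
      · rw [List.cons_append, pv_loop_cons_covered bk x (a' ++ b) cov hx,
          pv_loop_cons_covered bk x a' cov hx]
        apply iha
        refine le_trans (Finset.card_le_card ?_) h
        intro y hy
        simp only [List.toFinset_append, List.toFinset_cons, Finset.mem_sdiff, Finset.mem_union,
          Finset.mem_insert] at hy ⊢
        tauto
      · have hxm : x ∉ cov := by simpa [PySem.Set.contains] using hx
        have hcard := pv_card_step bk x a' cov hxm
        have hpos : 0 < ((pvPrevs bk ++ x :: a').toFinset \ cov.toFinset).card :=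
          Finset.card_pos.2 ⟨x, by simp [hxm]⟩
        rw [List.cons_append, pv_loop_cons_uncovered bk x (a' ++ b) cov hx,
          pv_loop_cons_uncovered bk x a' cov hx, ← List.append_assoc]
        exact ihn (n - 1) (by omega) (pvChildren bk x ++ a') b (PySem.Set.add cov x) (by omega)

theorem pv_fold_no_match (l : List (Int × Int × List Int)) (s : Int)
    (g : List Int → Int × List Int → List Int) (c0 : List Int)
    (h : ∀ it ∈ l, it.1 ≠ s) :
    l.foldl (fun cov it => if it.1 == s then g cov it.2 else cov) c0 = c0 := by
  induction l generalizing c0 with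
  | nil => rfl
  | cons p l ih =>
    simp only [List.foldl_cons]
    rw [if_neg (by simpa using h p (by simp))]
    exact ih _ (fun it hit => h it (by simp [hit]))

theorem pv_items_fold_eq (f : Nat) (bk : PySem.Dict Int (Int × List Int))
    (l : List (Int × Int × List Int)) (s : Int) (c0 : List Int)
    (hnd : (l.map (fun p => p.1)).Nodup) :
    l.foldl
      (fun cov it =>
        if it.1 == s then
          it.2.2.foldl
            (fun cov state =>
              if PySem.Set.contains cov state then cov
              else r_build_covered_rec f bk cov state)
            cov
        else cov)
      c0
    = ((PySem.Dict.mk l).get? s).elim c0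
        (fun v => v.2.foldl
            (fun cov state =>
              if PySem.Set.contains cov state then cov
              else r_build_covered_rec f bk cov state)
            c0) := by
  induction l generalizing c0 with
  | nil => simp [PySem.Dict.get?]
  | cons p l ih =>
    obtain ⟨k, v⟩ := p
    simp only [List.map_cons, List.nodup_cons] at hnd
    simp only [List.foldl_cons, PySem.Dict.get?_mk_cons]
    by_cases hk : k = s
    · subst hk
      rw [if_pos (by simp), if_pos (by simp)]
      simp only [Option.elim_some]
      exact pv_fold_no_match l k
        (fun cov w => w.2.foldl
          (fun cov state =>
            if PySem.Set.contains cov state then cov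
            else r_build_covered_rec f bk cov state) cov) _
        (fun it hit h => hnd.1 (h ▸ List.mem_map.2 ⟨it, hit, rfl⟩))
    · rw [if_neg (by simpa using hk), if_neg (by simpa using hk)]
      exact ih c0 hnd.2

theorem pv_main (bk : PySem.Dict Int (Int × List Int))
    (hnd : (bk.items.map (fun p => p.1)).Nodup) :
    ∀ (n f : Nat) (pending cov : List Int),
      ((pvPrevs bk).toFinset \ cov.toFinset).card < f →
      ((pvPrevs bk).toFinset \ cov.toFinset).card ≤ n →
      (∀ x ∈ pending, x ∈ pvPrevs bk) →
      pending.foldl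
        (fun cov state =>
          if PySem.Set.contains cov state then cov
          else r_build_covered_rec f bk cov state)
        cov
      = r_build_covered_loop bk pending cov := by
  intro n
  induction n using Nat.strong_induction_on with
  | _ n ihn =>
    intro f pending
    induction pending with
    | nil => intro cov _ _ _; rw [List.foldl_nil, pv_loop_nil]
    | cons p rest iha =>
      intro cov hb hn hp
      by_cases hpc : PySem.Set.contains cov p
      · rw [List.foldl_cons, if_pos hpc, pv_loop_cons_covered bk p rest cov hpc]
        exact iha cov hb hn (fun x hx => hp x (by simp [hx]))
      · have hpm : p ∉ cov := by simpa [PySem.Set.contains] using hpc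
        have hpP : p ∈ pvPrevs bk := hp p (by simp)
        have hcardeq := pv_card_add bk p cov hpP hpm
        obtain ⟨f', rfl⟩ : ∃ f', f = f' + 1 := ⟨f - 1, by omega⟩
        rw [List.foldl_cons, if_neg hpc]
        simp only [r_build_covered_rec]
        rw [pv_items_fold_eq f' bk bk.items p _ hnd,
          show PySem.Dict.mk bk.items = bk from rfl]
        have hmatch : ∀ (c0 : List Int),
            ((bk.get? p).elim c0
              (fun v => v.2.foldl
                (fun cov state =>
                  if PySem.Set.contains cov state then cov
                  else r_build_covered_rec f' bk cov state) c0))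
            = (pvChildren bk p).foldl
                (fun cov state =>
                  if PySem.Set.contains cov state then cov
                  else r_build_covered_rec f' bk cov state) c0 := by
          intro c0; cases hg : bk.get? p <;> simp [pvChildren, hg]
        rw [hmatch]
        have hn1 : 1 ≤ n := by omega
        have hchild := ihn (n - 1) (by omega) f' (pvChildren bk p) (PySem.Set.add cov p)
          (by omega) (by omega) (fun x hx => pvChildren_subset bk p x hx)
        rw [hchild]
        -- the loop side
        obtain ⟨e, he⟩ := pv_loop_mono bk (pvChildren bk p) (PySem.Set.add cov p)
        have hsubX : (PySem.Set.add cov p).toFinset ⊆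
            (r_build_covered_loop bk (pvChildren bk p) (PySem.Set.add cov p)).toFinset := by
          rw [he]; intro y hy; simp at hy ⊢; exact Or.inl hy
        have hcardX : ((pvPrevs bk).toFinset \
            (r_build_covered_loop bk (pvChildren bk p) (PySem.Set.add cov p)).toFinset).card
            ≤ ((pvPrevs bk).toFinset \ (PySem.Set.add cov p).toFinset).card :=
          Finset.card_le_card (Finset.sdiff_subset_sdiff (Finset.Subset.refl _) hsubX)
        rw [pv_loop_cons_uncovered bk p rest cov hpc,
          pv_loop_append bk (((pvPrevs bk).toFinset \ (PySem.Set.add cov p).toFinset).card)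
            (pvChildren bk p) rest (PySem.Set.add cov p)
            (by
              refine Finset.card_le_card ?_
              intro y hy
              simp only [List.toFinset_append, Finset.mem_sdiff, Finset.mem_union,
                List.mem_toFinset] at hy ⊢
              rcases hy with ⟨hin, hout⟩
              refine ⟨?_, hout⟩
              rcases hin with h | h
              · exact h
              · exact pvChildren_subset bk p y h)]
        exact ihn (n - 1) (by omega) (f' + 1) rest _ (by omega) (by omega)
          (fun x hx => hp x (by simp [hx]))

-- the two ports agree on every input
theorem pv_equal (covered : List Int) (best_known : List (Int × Int × List Int)) (src : Int) :
    r_build_covered covered best_known src = r_build_covered_alt covered best_known src := by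
  have hnd : ((PySem.Dict.ofList best_known (ν := Int × List Int)).items.map (fun p => p.1)).Nodup :=
    PySem.Dict.nodup_keys_ofList best_known
  show r_build_covered_rec (((pvPrevs (PySem.Dict.ofList best_known)).length + 1) + 1)
        (PySem.Dict.ofList best_known) covered src
      = r_build_covered_loop (PySem.Dict.ofList best_known)
          (pvChildren (PySem.Dict.ofList best_known) src) (PySem.Set.add covered src)
  generalize PySem.Dict.ofList best_known = d at hnd ⊢
  rw [r_build_covered_rec.eq_2]
  rw [pv_items_fold_eq ((pvPrevs d).length + 1) d d.items src _ hnd,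
    show PySem.Dict.mk d.items = d from rfl]
  have hmatch :
      ((d.get? src).elim (PySem.Set.add covered src)
        (fun v => v.2.foldl
          (fun cov state =>
            if PySem.Set.contains cov state then cov
            else r_build_covered_rec ((pvPrevs d).length + 1) d cov state)
          (PySem.Set.add covered src)))
      = (pvChildren d src).foldl
          (fun cov state =>
            if PySem.Set.contains cov state then cov
            else r_build_covered_rec ((pvPrevs d).length + 1) d cov state)
          (PySem.Set.add covered src) := by
    cases hg : d.get? src <;> simp [pvChildren, hg]
  rw [hmatch]
  apply pv_main d hnd (((pvPrevs d).toFinset \ (PySem.Set.add covered src).toFinset).card)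
  · calc ((pvPrevs d).toFinset \ (PySem.Set.add covered src).toFinset).card
        ≤ (pvPrevs d).toFinset.card := Finset.card_le_card (Finset.sdiff_subset)
      _ ≤ (pvPrevs d).length := List.toFinset_card_le _
      _ < (pvPrevs d).length + 1 := by omega
  · exact le_refl _
  · exact fun x hx => pvChildren_subset d src x hx

-- ===== VERDICT (by name: the statement is the Claim_ definition above) =====
theorem r_build_covered_spec : Claim_equal_r_build_covered := by
  intro covered best_known src _
  unfold Spec_r_build_covered
  exact pv_equal covered best_known src
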